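-- pv_equiv track=rewrite | github.com/Nekrasov-AA/ai-logo-studio | worker/src/consumer.py | determine_industry
-- ===== SOURCE A (Python) =====
-- def determine_industry(business_type: str) -> str:
--     """Determine industry from business type."""
--     bt_lower = business_type.lower()
--     if any(word in bt_lower for word in ['tech', 'software', 'ai', 'digital', 'data']):
--         return 'technology'
--     elif any(word in bt_lower for word in ['health', 'medical', 'care', 'clinic', 'hospital']):
--         return 'healthcare'
--     elif any(word in bt_lower for word in ['finance', 'bank', 'investment', 'trading']):
--         return 'finance'
--     elif any(word in bt_lower for word in ['food', 'restaurant', 'cafe', 'culinary']):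
--         return 'food'
--     elif any(word in bt_lower for word in ['design', 'creative', 'art', 'agency']):
--         return 'creative'
--     elif any(word in bt_lower for word in ['retail', 'shop', 'store', 'fashion']):
--         return 'retail'
--     elif any(word in bt_lower for word in ['education', 'school', 'university', 'learning']):
--         return 'education'
--     elif any(word in bt_lower for word in ['consulting', 'advisory', 'strategy']):
--         return 'consulting'
--     else:
--         return 'other'
-- ===== SOURCE B (Python) =====
-- # Single left-to-right scan over the string: at each position, look up each
-- # possible window (one per distinct keyword length) in a keyword->category dict,
-- # keeping the smallest (highest-priority) category index seen anywhere.
-- _KEYWORD_INDEX = {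
--     'tech': 0, 'software': 0, 'ai': 0, 'digital': 0, 'data': 0,
--     'health': 1, 'medical': 1, 'care': 1, 'clinic': 1, 'hospital': 1,
--     'finance': 2, 'bank': 2, 'investment': 2, 'trading': 2,
--     'food': 3, 'restaurant': 3, 'cafe': 3, 'culinary': 3,
--     'design': 4, 'creative': 4, 'art': 4, 'agency': 4,
--     'retail': 5, 'shop': 5, 'store': 5, 'fashion': 5,
--     'education': 6, 'school': 6, 'university': 6, 'learning': 6,
--     'consulting': 7, 'advisory': 7, 'strategy': 7,
-- }
-- _INDUSTRIES = ['technology', 'healthcare', 'finance', 'food',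
--                'creative', 'retail', 'education', 'consulting']
-- _LENGTHS = [2, 3, 4, 5, 6, 7, 8, 9, 10]  # the distinct keyword lengths
--
--
-- def determine_industry(business_type: str) -> str:
--     """Determine industry from business type."""
--     bt = business_type.lower()
--     best = len(_INDUSTRIES)  # sentinel: no keyword found yet
--     for i in range(len(bt)):
--         for length in _LENGTHS:
--             idx = _KEYWORD_INDEX.get(bt[i:i + length])
--             if idx is not None and idx < best:
--                 best = idx
--     return _INDUSTRIES[best] if best < len(_INDUSTRIES) else 'other'
-- ===== Notes on version B (the rewrite author's own statement) =====
-- stated objective: alternative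
-- what changed: Replaced the per-keyword substring-search cascade by a single left-to-right scan over string positions that looks up each fixed-length window in a keyword-to-category dictionary and keeps the minimum (highest-priority) category index.
import Mathlib
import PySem

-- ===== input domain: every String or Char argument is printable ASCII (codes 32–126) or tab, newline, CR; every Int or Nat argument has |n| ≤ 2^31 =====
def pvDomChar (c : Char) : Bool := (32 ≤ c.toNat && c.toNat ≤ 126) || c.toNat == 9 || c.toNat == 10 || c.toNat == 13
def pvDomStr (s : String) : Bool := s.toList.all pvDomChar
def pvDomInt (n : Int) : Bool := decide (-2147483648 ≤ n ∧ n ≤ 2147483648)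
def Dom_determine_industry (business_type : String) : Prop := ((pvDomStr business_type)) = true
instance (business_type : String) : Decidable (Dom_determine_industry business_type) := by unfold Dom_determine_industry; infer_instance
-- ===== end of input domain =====

-- B replaces A's per-keyword substring-search cascade by one scan over string positions
-- with dictionary lookups of fixed-length windows, keeping the minimum category index (alternative algorithm, similar cost).

-- ===== PORT A =====
def determine_industry (business_type : String) : String :=
  let bt_lower := PySem.Str.lower business_type
  if (["tech", "software", "ai", "digital", "data"] : List String).any (fun word => PySem.Str.isIn word bt_lower) then
    "technology"
  else if (["health", "medical", "care", "clinic", "hospital"] : List String).any (fun word => PySem.Str.isIn word bt_lower) then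
    "healthcare"
  else if (["finance", "bank", "investment", "trading"] : List String).any (fun word => PySem.Str.isIn word bt_lower) then
    "finance"
  else if (["food", "restaurant", "cafe", "culinary"] : List String).any (fun word => PySem.Str.isIn word bt_lower) then
    "food"
  else if (["design", "creative", "art", "agency"] : List String).any (fun word => PySem.Str.isIn word bt_lower) then
    "creative"
  else if (["retail", "shop", "store", "fashion"] : List String).any (fun word => PySem.Str.isIn word bt_lower) then
    "retail"
  else if (["education", "school", "university", "learning"] : List String).any (fun word => PySem.Str.isIn word bt_lower) then
    "education"
  else if (["consulting", "advisory", "strategy"] : List String).any (fun word => PySem.Str.isIn word bt_lower) then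
    "consulting"
  else
    "other"

-- ===== PORT B =====
-- the keyword -> category-index dictionary _KEYWORD_INDEX (values are 0..7, so Nat carries the Python ints exactly)
def kwIndex : PySem.Dict String Nat := PySem.Dict.mk
  [ ("tech", 0), ("software", 0), ("ai", 0), ("digital", 0), ("data", 0),
    ("health", 1), ("medical", 1), ("care", 1), ("clinic", 1), ("hospital", 1),
    ("finance", 2), ("bank", 2), ("investment", 2), ("trading", 2),
    ("food", 3), ("restaurant", 3), ("cafe", 3), ("culinary", 3),
    ("design", 4), ("creative", 4), ("art", 4), ("agency", 4),
    ("retail", 5), ("shop", 5), ("store", 5), ("fashion", 5),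
    ("education", 6), ("school", 6), ("university", 6), ("learning", 6),
    ("consulting", 7), ("advisory", 7), ("strategy", 7) ]

def industriesB : List String :=
  ["technology", "healthcare", "finance", "food", "creative", "retail", "education", "consulting"]

def kwLengths : List Nat := [2, 3, 4, 5, 6, 7, 8, 9, 10]

-- body of the inner 'for length in _LENGTHS' loop over one position i
def windowStep (bt : String) (best : Nat) (i : Int) : Nat :=
  kwLengths.foldl (fun best length =>
    match PySem.Dict.get? kwIndex (PySem.Str.slice bt (some i) (some (i + (length : Int)))) with
    | some idx => if idx < best then idx else best
    | none => best) best

def determine_industry_alt (business_type : String) : String :=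
  let bt := PySem.Str.lower business_type
  let best := (PySem.List.pyRange 0 (PySem.Str.len bt) 1).foldl (windowStep bt) industriesB.length
  -- '_INDUSTRIES[best] if best < len(_INDUSTRIES) else "other"': the guard makes the index in range, so getD is exact
  if best < industriesB.length then industriesB.getD best "other" else "other"

-- ===== PRECONDITION & SPEC =====
def Spec_determine_industry (business_type : String) (out : String) : Prop := out = determine_industry_alt business_type
instance (business_type : String) (out : String) : Decidable (Spec_determine_industry business_type out) := by unfold Spec_determine_industry; infer_instance

-- ===== CLAIM (what is proved, stated in full; the proofs are below) =====
def Claim_equal_determine_industry : Prop := ∀ (business_type : String), Dom_determine_industry business_type → Spec_determine_industry business_type (determine_industry business_type)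

-- ===== LEMMAS AND PROOFS =====

-- a window lookup hit at position i with window length L and value v
def hitAt (bt : String) (i : Int) (L : Nat) (v : Nat) : Prop :=
  PySem.Dict.get? kwIndex (PySem.Str.slice bt (some i) (some (i + (L : Int)))) = some v

-- H bt v: some window of bt in the scanned region hits the dictionary with value v
def hitSome (bt : String) (v : Nat) : Prop :=
  ∃ i ∈ PySem.List.pyRange 0 (PySem.Str.len bt) 1, ∃ L ∈ kwLengths, hitAt bt i L v

-- generic facts about the min-accumulating fold shape shared by both loops
theorem minfold_le {α : Type} (h : α → Option Nat) (xs : List α) (b : Nat) :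
    xs.foldl (fun b x => match h x with | some v => if v < b then v else b | none => b) b ≤ b := by
  induction xs generalizing b with
  | nil => simp
  | cons x xs ih =>
    simp only [List.foldl_cons]
    refine le_trans (ih _) ?_
    cases h x with
    | none => simp
    | some v => simp only; split <;> omega

theorem minfold_min {α : Type} (h : α → Option Nat) (xs : List α) (b : Nat)
    {x : α} (hx : x ∈ xs) {v : Nat} (hv : h x = some v) :
    xs.foldl (fun b x => match h x with | some v => if v < b then v else b | none => b) b ≤ v := by
  induction xs generalizing b with
  | nil => simp at hx
  | cons y ys ih =>
    simp only [List.foldl_cons]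
    rcases List.mem_cons.mp hx with rfl | hmem
    · refine le_trans (minfold_le h ys _) ?_
      rw [hv]; simp only; split <;> omega
    · exact ih _ hmem

theorem minfold_cases {α : Type} (h : α → Option Nat) (xs : List α) (b : Nat) :
    xs.foldl (fun b x => match h x with | some v => if v < b then v else b | none => b) b = b ∨
    ∃ x ∈ xs, h x = some (xs.foldl (fun b x => match h x with | some v => if v < b then v else b | none => b) b) := by
  induction xs generalizing b with
  | nil => left; rfl
  | cons y ys ih =>
    simp only [List.foldl_cons]
    rcases ih (match h y with | some v => if v < b then v else b | none => b) with heq | ⟨x, hx, hxv⟩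
    · rw [heq]
      cases hy : h y with
      | none => left; simp
      | some v =>
        simp only
        split
        · right; exact ⟨y, List.mem_cons_self, by rw [hy]⟩
        · left; rfl
    · right; exact ⟨x, List.mem_cons_of_mem _ hx, hxv⟩

-- windowStep IS the minfold shape at position i
theorem windowStep_eq (bt : String) (b : Nat) (i : Int) :
    windowStep bt b i = kwLengths.foldl (fun b L =>
      match (fun L : Nat => PySem.Dict.get? kwIndex (PySem.Str.slice bt (some i) (some (i + (L : Int))))) L with
      | some v => if v < b then v else b | none => b) b := rfl

-- the three fold properties lifted to the outer loop over positions
theorem outer_le (bt : String) (xs : List Int) (b : Nat) :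
    xs.foldl (windowStep bt) b ≤ b := by
  induction xs generalizing b with
  | nil => simp
  | cons i xs ih =>
    simp only [List.foldl_cons]
    refine le_trans (ih _) ?_
    rw [windowStep_eq]
    exact minfold_le _ _ _

theorem outer_min (bt : String) (xs : List Int) (b : Nat)
    {i : Int} (hi : i ∈ xs) {L : Nat} (hL : L ∈ kwLengths) {v : Nat} (hv : hitAt bt i L v) :
    xs.foldl (windowStep bt) b ≤ v := by
  induction xs generalizing b with
  | nil => simp at hi
  | cons j js ih =>
    simp only [List.foldl_cons]
    rcases List.mem_cons.mp hi with rfl | hmem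
    · refine le_trans (outer_le bt js _) ?_
      rw [windowStep_eq]
      exact minfold_min _ _ _ hL hv
    · exact ih _ hmem

theorem outer_cases (bt : String) (xs : List Int) (b : Nat) :
    xs.foldl (windowStep bt) b = b ∨
    ∃ i ∈ xs, ∃ L ∈ kwLengths, hitAt bt i L (xs.foldl (windowStep bt) b) := by
  induction xs generalizing b with
  | nil => left; rfl
  | cons j js ih =>
    simp only [List.foldl_cons]
    rcases ih (windowStep bt b j) with heq | ⟨i, hi, L, hL, hv⟩
    · rw [heq, windowStep_eq]
      rcases minfold_cases (fun L : Nat => PySem.Dict.get? kwIndex (PySem.Str.slice bt (some j) (some (j + (L : Int))))) kwLengths b with heq2 | ⟨L, hL, hv⟩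
      · left; exact heq2
      · right; exact ⟨j, List.mem_cons_self, L, hL, hv⟩
    · right; exact ⟨i, List.mem_cons_of_mem _ hi, L, hL, hv⟩

-- keyword table sanity: unique keys, keyword lengths all listed, values below 8, keywords nonempty
theorem kwIndex_nodup : (PySem.Dict.keys kwIndex).Nodup := by decide

theorem kwIndex_items_facts :
    ∀ p ∈ (PySem.Dict.items kwIndex), p.1.toList.length ∈ kwLengths ∧ p.1.toList ≠ [] ∧ p.2 < 8 := by decide

-- a window of bt is a take-of-drop of bt.toList
theorem window_toList (bt : String) (j L : Nat) :
    (PySem.Str.slice bt (some (j : Int)) (some ((j : Int) + (L : Int)))).toList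
      = (bt.toList.drop j).take L := by
  rw [PySem.Str.toList_slice, PySem.Chars.slice_eq_listSlice, PySem.List.slice_natCast_add]

-- a dictionary hit in the scanned region yields a keyword occurring in bt
theorem hit_to_isIn (bt : String) {i : Int} (hi : 0 ≤ i) {L v : Nat} (hv : hitAt bt i L v) :
    ∃ w, (w, v) ∈ (PySem.Dict.items kwIndex) ∧ PySem.Str.isIn w bt = true := by
  set w := PySem.Str.slice bt (some i) (some (i + (L : Int))) with hw
  refine ⟨w, PySem.Dict.mem_items_of_get?_eq_some _ hv, ?_⟩
  rw [PySem.Str.isIn_iff_infix]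
  obtain ⟨j, rfl⟩ := Int.eq_ofNat_of_zero_le hi
  rw [hw, window_toList]
  exact (List.take_prefix _ _).isInfix.trans (List.drop_suffix _ _).isInfix

-- a keyword occurring in bt yields a dictionary hit in the scanned region
theorem isIn_to_hit (bt : String) {w : String} {v : Nat}
    (hmem : (w, v) ∈ (PySem.Dict.items kwIndex)) (hin : PySem.Str.isIn w bt = true) :
    hitSome bt v := by
  obtain ⟨hlen, hne, _⟩ := kwIndex_items_facts _ hmem
  have hinf : w.toList <:+: bt.toList := (PySem.Str.isIn_iff_infix w bt).mp hin
  have : PySem.Chars.isIn w.toList bt.toList = true := by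
    rw [PySem.Chars.isIn_iff_infix]; exact hinf
  obtain ⟨j, hpre⟩ := (PySem.Chars.exists_prefix_drop_iff_isIn w.toList bt.toList).mpr this
  have hjlt : j < bt.toList.length := by
    by_contra hge
    rw [List.drop_eq_nil_of_le (by omega)] at hpre
    exact hne (List.prefix_nil.mp hpre)
  refine ⟨(j : Int), ?_, w.toList.length, hlen, ?_⟩
  · rw [PySem.List.mem_pyRange_one]
    constructor
    · exact Int.natCast_nonneg j
    · rw [PySem.Str.len_eq]; exact_mod_cast hjlt
  · have hwin : PySem.Str.slice bt (some (j : Int)) (some ((j : Int) + (w.toList.length : Int))) = w := by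
      apply String.ext  -- equality of the underlying char lists
      rw [window_toList]
      exact ((List.prefix_iff_eq_take.mp hpre).symm)
    unfold hitAt
    rw [hwin]
    exact PySem.Dict.get?_of_mem_items _ hmem kwIndex_nodup

-- the dictionary rows with value c are exactly A's c-th keyword list
theorem kw_cat0 (w : String) : (w, 0) ∈ (PySem.Dict.items kwIndex) ↔ w ∈ (["tech", "software", "ai", "digital", "data"] : List String) := by
  simp [kwIndex]

theorem kw_cat1 (w : String) : (w, 1) ∈ (PySem.Dict.items kwIndex) ↔ w ∈ (["health", "medical", "care", "clinic", "hospital"] : List String) := by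
  simp [kwIndex]

theorem kw_cat2 (w : String) : (w, 2) ∈ (PySem.Dict.items kwIndex) ↔ w ∈ (["finance", "bank", "investment", "trading"] : List String) := by
  simp [kwIndex]

theorem kw_cat3 (w : String) : (w, 3) ∈ (PySem.Dict.items kwIndex) ↔ w ∈ (["food", "restaurant", "cafe", "culinary"] : List String) := by
  simp [kwIndex]

theorem kw_cat4 (w : String) : (w, 4) ∈ (PySem.Dict.items kwIndex) ↔ w ∈ (["design", "creative", "art", "agency"] : List String) := by
  simp [kwIndex]

theorem kw_cat5 (w : String) : (w, 5) ∈ (PySem.Dict.items kwIndex) ↔ w ∈ (["retail", "shop", "store", "fashion"] : List String) := by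
  simp [kwIndex]

theorem kw_cat6 (w : String) : (w, 6) ∈ (PySem.Dict.items kwIndex) ↔ w ∈ (["education", "school", "university", "learning"] : List String) := by
  simp [kwIndex]

theorem kw_cat7 (w : String) : (w, 7) ∈ (PySem.Dict.items kwIndex) ↔ w ∈ (["consulting", "advisory", "strategy"] : List String) := by
  simp [kwIndex]

-- a window hit with value c occurs iff A's any-test for category c succeeds
theorem hitSome_iff_any (bt : String) (c : Nat) (ws : List String)
    (hbr : ∀ w, ((w, c) ∈ PySem.Dict.items kwIndex) ↔ w ∈ ws) :
    hitSome bt c ↔ ws.any (fun w => PySem.Str.isIn w bt) = true := by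
  rw [List.any_eq_true]
  constructor
  · rintro ⟨i, hi, L, hL, hv⟩
    obtain ⟨w, hw, hin⟩ := hit_to_isIn bt (PySem.List.mem_pyRange_one.mp hi).1 hv
    exact ⟨w, (hbr w).mp hw, hin⟩
  · rintro ⟨w, hw, hin⟩
    exact isIn_to_hit bt ((hbr w).mpr hw) hin

-- ===== VERDICT (by name: the statement is the Claim_ definition above) =====
theorem determine_industry_spec : Claim_equal_determine_industry := by
  intro business_type _
  unfold Spec_determine_industry determine_industry determine_industry_alt
  set btl := PySem.Str.lower business_type with hbtl
  simp only []
  set best := (PySem.List.pyRange 0 (PySem.Str.len btl) 1).foldl (windowStep btl) industriesB.length with hbest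
  have hle8 : best ≤ 8 := by
    rw [hbest]; exact le_trans (outer_le _ _ _) (by simp [industriesB])
  have hcases : best = industriesB.length ∨ hitSome btl best := by
    rw [hbest, hitSome]
    exact outer_cases btl _ _
  have hlt8 : ∀ v, hitSome btl v → v < 8 := by
    rintro v ⟨i, hi, L, hL, hv⟩
    exact (kwIndex_items_facts _ (PySem.Dict.mem_items_of_get?_eq_some _ hv)).2.2
  have hmin : ∀ v, hitSome btl v → best ≤ v := by
    rintro v ⟨i, hi, L, hL, hv⟩
    rw [hbest]
    exact outer_min btl _ _ hi hL hv
  have h0 := hitSome_iff_any btl 0 _ kw_cat0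
  have h1 := hitSome_iff_any btl 1 _ kw_cat1
  have h2 := hitSome_iff_any btl 2 _ kw_cat2
  have h3 := hitSome_iff_any btl 3 _ kw_cat3
  have h4 := hitSome_iff_any btl 4 _ kw_cat4
  have h5 := hitSome_iff_any btl 5 _ kw_cat5
  have h6 := hitSome_iff_any btl 6 _ kw_cat6
  have h7 := hitSome_iff_any btl 7 _ kw_cat7
  have hlen : industriesB.length = 8 := by simp [industriesB]
  rw [hlen] at hcases
  by_cases hb0 : (["tech", "software", "ai", "digital", "data"] : List String).any (fun word => PySem.Str.isIn word btl) = true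
  · have : best = 0 := Nat.le_zero.mp (hmin 0 (h0.mpr hb0))
    rw [if_pos hb0, this, hlen]
    norm_num [industriesB]
  by_cases hb1 : (["health", "medical", "care", "clinic", "hospital"] : List String).any (fun word => PySem.Str.isIn word btl) = true
  · have hle : best ≤ 1 := hmin 1 (h1.mpr hb1)
    have : best = 1 := by
      rcases hcases with h8 | hh
      · omega
      · rcases Nat.lt_or_ge best 1 with hlt | hge
        · exfalso; interval_cases best; exact hb0 (h0.mp hh)
        · omega
    rw [if_neg hb0, if_pos hb1, this, hlen]
    norm_num [industriesB]
  by_cases hb2 : (["finance", "bank", "investment", "trading"] : List String).any (fun word => PySem.Str.isIn word btl) = true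
  · have hle : best ≤ 2 := hmin 2 (h2.mpr hb2)
    have : best = 2 := by
      rcases hcases with h8 | hh
      · omega
      · rcases Nat.lt_or_ge best 2 with hlt | hge
        · exfalso; interval_cases best
          · exact hb0 (h0.mp hh)
          · exact hb1 (h1.mp hh)
        · omega
    rw [if_neg hb0, if_neg hb1, if_pos hb2, this, hlen]
    norm_num [industriesB]
  by_cases hb3 : (["food", "restaurant", "cafe", "culinary"] : List String).any (fun word => PySem.Str.isIn word btl) = true
  · have hle : best ≤ 3 := hmin 3 (h3.mpr hb3)
    have : best = 3 := by
      rcases hcases with h8 | hh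
      · omega
      · rcases Nat.lt_or_ge best 3 with hlt | hge
        · exfalso; interval_cases best
          · exact hb0 (h0.mp hh)
          · exact hb1 (h1.mp hh)
          · exact hb2 (h2.mp hh)
        · omega
    rw [if_neg hb0, if_neg hb1, if_neg hb2, if_pos hb3, this, hlen]
    norm_num [industriesB]
  by_cases hb4 : (["design", "creative", "art", "agency"] : List String).any (fun word => PySem.Str.isIn word btl) = true
  · have hle : best ≤ 4 := hmin 4 (h4.mpr hb4)
    have : best = 4 := by
      rcases hcases with h8 | hh
      · omega
      · rcases Nat.lt_or_ge best 4 with hlt | hge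
        · exfalso; interval_cases best
          · exact hb0 (h0.mp hh)
          · exact hb1 (h1.mp hh)
          · exact hb2 (h2.mp hh)
          · exact hb3 (h3.mp hh)
        · omega
    rw [if_neg hb0, if_neg hb1, if_neg hb2, if_neg hb3, if_pos hb4, this, hlen]
    norm_num [industriesB]
  by_cases hb5 : (["retail", "shop", "store", "fashion"] : List String).any (fun word => PySem.Str.isIn word btl) = true
  · have hle : best ≤ 5 := hmin 5 (h5.mpr hb5)
    have : best = 5 := by
      rcases hcases with h8 | hh
      · omega
      · rcases Nat.lt_or_ge best 5 with hlt | hge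
        · exfalso; interval_cases best
          · exact hb0 (h0.mp hh)
          · exact hb1 (h1.mp hh)
          · exact hb2 (h2.mp hh)
          · exact hb3 (h3.mp hh)
          · exact hb4 (h4.mp hh)
        · omega
    rw [if_neg hb0, if_neg hb1, if_neg hb2, if_neg hb3, if_neg hb4, if_pos hb5, this, hlen]
    norm_num [industriesB]
  by_cases hb6 : (["education", "school", "university", "learning"] : List String).any (fun word => PySem.Str.isIn word btl) = true
  · have hle : best ≤ 6 := hmin 6 (h6.mpr hb6)
    have : best = 6 := by
      rcases hcases with h8 | hh
      · omega
      · rcases Nat.lt_or_ge best 6 with hlt | hge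
        · exfalso; interval_cases best
          · exact hb0 (h0.mp hh)
          · exact hb1 (h1.mp hh)
          · exact hb2 (h2.mp hh)
          · exact hb3 (h3.mp hh)
          · exact hb4 (h4.mp hh)
          · exact hb5 (h5.mp hh)
        · omega
    rw [if_neg hb0, if_neg hb1, if_neg hb2, if_neg hb3, if_neg hb4, if_neg hb5, if_pos hb6, this, hlen]
    norm_num [industriesB]
  by_cases hb7 : (["consulting", "advisory", "strategy"] : List String).any (fun word => PySem.Str.isIn word btl) = true
  · have hle : best ≤ 7 := hmin 7 (h7.mpr hb7)
    have : best = 7 := by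
      rcases hcases with h8 | hh
      · omega
      · rcases Nat.lt_or_ge best 7 with hlt | hge
        · exfalso; interval_cases best
          · exact hb0 (h0.mp hh)
          · exact hb1 (h1.mp hh)
          · exact hb2 (h2.mp hh)
          · exact hb3 (h3.mp hh)
          · exact hb4 (h4.mp hh)
          · exact hb5 (h5.mp hh)
          · exact hb6 (h6.mp hh)
        · omega
    rw [if_neg hb0, if_neg hb1, if_neg hb2, if_neg hb3, if_neg hb4, if_neg hb5, if_neg hb6, if_pos hb7, this, hlen]
    norm_num [industriesB]
  · have : best = 8 := by
      rcases hcases with h8 | hh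
      · exact h8
      · exfalso
        interval_cases best
        · exact hb0 (h0.mp hh)
        · exact hb1 (h1.mp hh)
        · exact hb2 (h2.mp hh)
        · exact hb3 (h3.mp hh)
        · exact hb4 (h4.mp hh)
        · exact hb5 (h5.mp hh)
        · exact hb6 (h6.mp hh)
        · exact hb7 (h7.mp hh)
        · exact Nat.lt_irrefl 8 (hlt8 8 hh)
    rw [if_neg hb0, if_neg hb1, if_neg hb2, if_neg hb3, if_neg hb4, if_neg hb5, if_neg hb6, if_neg hb7, this, hlen]
    norm_num
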